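-- pv_equiv track=rewrite | github.com/jherskow/intro2cs_new | intro2cs/ex5/ex5.py | create_basket_from_txt
-- ===== SOURCE A (Python) =====
-- EMPTY_STRING = ""
--
-- def create_basket_from_txt(basket_txt):
--     """
--     Receives text representation of few items (and maybe some garbage
--       at the edges)
--     Returns a basket- list of ItemCodes that were included in basket_txt
--     """
--     between_delimiters = False
--     basket = []
--     word = EMPTY_STRING
--     for letter in basket_txt:
--         if letter == "[":
--             between_delimiters = True
--         elif letter == "]":
--             if between_delimiters:
--                 basket.append(word)
--                 between_delimiters = False
--                 word = EMPTY_STRING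
--         elif between_delimiters:
--             word += letter
--     return basket
-- ===== SOURCE B (Python) =====
-- def create_basket_from_txt(basket_txt):
--     basket = []
--     for piece in basket_txt.split(']')[:-1]:
--         parts = piece.split('[')
--         if len(parts) > 1:
--             basket.append(''.join(parts[1:]))
--     return basket
-- ===== Notes on version B (the rewrite author's own statement) =====
-- stated objective: idiomatic
-- what changed: Replaced A's char-by-char boolean state machine with a split-based parse: split the text on the closing bracket, and for each piece but the last that contains an opening bracket, emit the text after its first opening bracket with further opening brackets removed via split/join.
import Mathlib
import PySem

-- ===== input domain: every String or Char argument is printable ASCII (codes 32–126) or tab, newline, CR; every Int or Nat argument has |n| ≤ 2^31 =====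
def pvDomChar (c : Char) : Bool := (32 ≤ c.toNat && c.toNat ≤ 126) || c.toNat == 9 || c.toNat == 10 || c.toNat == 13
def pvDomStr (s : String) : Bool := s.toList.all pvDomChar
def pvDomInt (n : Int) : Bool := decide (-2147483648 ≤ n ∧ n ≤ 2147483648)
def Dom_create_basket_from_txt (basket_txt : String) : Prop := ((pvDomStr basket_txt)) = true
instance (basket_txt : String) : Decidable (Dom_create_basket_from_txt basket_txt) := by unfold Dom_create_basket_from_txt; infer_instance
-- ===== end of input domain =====

-- B parses the text by splitting on the closing bracket and, for each piece but the last
-- that contains an opening bracket, emitting the text after its first opening bracket with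
-- further opening brackets removed (split + join) — an idiomatic split-based parse instead
-- of A's char-by-char state machine (measurably faster in CPython: bulk split vs per-char loop).


-- ===== PORT A =====
-- one loop step of A: state = (between_delimiters, basket, word); word kept as List Char
-- (Lean's own String append is opaque to the kernel), turned into a String when appended
def pvStepA (st : Bool × List String × List Char) (letter : Char) : Bool × List String × List Char :=
  if letter = '[' then (true, st.2.1, st.2.2)
  else if letter = ']' then
    (if st.1 then (false, st.2.1 ++ [String.ofList st.2.2], []) else st)
  else if st.1 then (st.1, st.2.1, st.2.2 ++ [letter])
  else st

def create_basket_from_txt (basket_txt : String) : List String :=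
  (basket_txt.toList.foldl pvStepA (false, ([] : List String), ([] : List Char))).2.1

-- ===== PORT B =====
def create_basket_from_txt_alt (basket_txt : String) : List String :=
  (PySem.List.slice (PySem.Chars.splitOn basket_txt.toList [']']) none (some (-1))).foldl
    (fun basket piece =>
      let parts := PySem.Chars.splitOn piece ['[']
      if parts.length > 1 then
        basket ++ [String.ofList (PySem.Chars.join [] (PySem.List.slice parts (some 1) none))]
      else basket) []

-- ===== PRECONDITION & SPEC =====
def Spec_create_basket_from_txt (basket_txt : String) (out : List String) : Prop := out = create_basket_from_txt_alt basket_txt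
instance (basket_txt : String) (out : List String) : Decidable (Spec_create_basket_from_txt basket_txt out) := by unfold Spec_create_basket_from_txt; infer_instance

-- ===== CLAIM (what is proved, stated in full; the proofs are below) =====
def Claim_equal_create_basket_from_txt : Prop := ∀ (basket_txt : String), Dom_create_basket_from_txt basket_txt → Spec_create_basket_from_txt basket_txt (create_basket_from_txt basket_txt)

-- ===== LEMMAS AND PROOFS =====

-- reference splitter: pvSplit c pre s = the pieces of (pre ++ s) split on the single char c
def pvSplit (c : Char) (pre : List Char) : List Char → List (List Char)
  | [] => [pre]
  | x :: t => if x = c then pre :: pvSplit c [] t else pvSplit c (pre ++ [x]) t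

-- reference state machine for A (basket only; word as List Char)
def pvG (flag : Bool) (word : List Char) : List Char → List (List Char)
  | [] => []
  | x :: t =>
    if x = '[' then pvG true word t
    else if x = ']' then (if flag then word :: pvG false [] t else pvG flag word t)
    else if flag then pvG flag (word ++ [x]) t
    else pvG flag word t

-- what one ']'-free piece contributes to the basket
def pvEmit (p : List Char) : List (List Char) :=
  if '[' ∈ p then [((p.dropWhile (· ≠ '[')).tail).filter (· ≠ '[')] else []

theorem pvGo_eq (c : Char) : ∀ (fuel : Nat) (l cur : List Char) (acc : List (List Char)),
    l.length < fuel →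
    PySem.Chars.splitOn.go [c] fuel l cur acc = acc.reverse ++ pvSplit c cur.reverse l := by
  intro fuel
  induction fuel with
  | zero => intro l cur acc h; omega
  | succ n ih =>
    intro l cur acc h
    cases l with
    | nil => simp [PySem.Chars.splitOn.go, pvSplit]
    | cons x t =>
      by_cases hx : x = c
      · subst hx
        simp only [PySem.Chars.splitOn.go, List.isPrefixOf, BEq.rfl, Bool.true_and,
          if_true, List.length_cons, List.length_nil, List.drop_succ_cons, List.drop_zero]
        rw [ih t [] (cur.reverse :: acc) (by simpa using Nat.lt_of_succ_lt_succ h)]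
        simp [pvSplit]
      · have hb : ([c].isPrefixOf (x :: t)) = false := by
          simp [List.isPrefixOf]; exact fun hc => (hx hc.symm).elim
        simp only [PySem.Chars.splitOn.go, hb, if_neg, Bool.false_eq_true, not_false_iff,
          if_false]
        rw [ih t (x :: cur) acc (by simpa using Nat.lt_of_succ_lt_succ h)]
        simp [pvSplit, hx]

theorem pvSplitOn_eq (c : Char) (s : List Char) :
    PySem.Chars.splitOn s [c] = pvSplit c [] s := by
  unfold PySem.Chars.splitOn
  simpa using pvGo_eq c (s.length + 1) s [] [] (by omega)

theorem pvSplit_length (c : Char) : ∀ (s pre : List Char),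
    (pvSplit c pre s).length = s.count c + 1 := by
  intro s
  induction s with
  | nil => intro pre; simp [pvSplit]
  | cons x t ih =>
    intro pre
    by_cases hx : x = c
    · subst hx; simp [pvSplit, ih, List.count_cons]
    · simp [pvSplit, hx, ih, List.count_cons, Ne.symm hx]

theorem pvSplit_flatten (c : Char) : ∀ (s pre : List Char),
    (pvSplit c pre s).flatten = pre ++ s.filter (· ≠ c) := by
  intro s
  induction s with
  | nil => intro pre; simp [pvSplit]
  | cons x t ih =>
    intro pre
    by_cases hx : x = c
    · subst hx; simp [pvSplit, ih]
    · simp [pvSplit, hx, ih]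

theorem pvSplit_first (c : Char) : ∀ (a : List Char), c ∉ a → ∀ (pre r : List Char),
    pvSplit c pre (a ++ c :: r) = (pre ++ a) :: pvSplit c [] r := by
  intro a
  induction a with
  | nil => intro _ pre r; simp [pvSplit]
  | cons x t ih =>
    intro hmem pre r
    have hx : x ≠ c := fun h => hmem (h ▸ List.mem_cons_self ..)
    have ht : c ∉ t := fun h => hmem (List.mem_cons_of_mem _ h)
    simp [pvSplit, hx, ih ht]

theorem pvSplit_of_not_mem (c : Char) : ∀ (s : List Char), c ∉ s → ∀ (pre : List Char),
    pvSplit c pre s = [pre ++ s] := by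
  intro s
  induction s with
  | nil => intro _ pre; simp [pvSplit]
  | cons x t ih =>
    intro hmem pre
    have hx : x ≠ c := fun h => hmem (h ▸ List.mem_cons_self ..)
    simp [pvSplit, hx, ih (fun h => hmem (List.mem_cons_of_mem _ h))]

theorem pvFoldA : ∀ (s : List Char) (flag : Bool) (basket : List String) (word : List Char),
    (s.foldl pvStepA (flag, basket, word)).2.1 = basket ++ (pvG flag word s).map String.ofList := by
  intro s
  induction s with
  | nil => intro flag basket word; simp [pvG]
  | cons x t ih =>
    intro flag basket word
    by_cases hx : x = '['
    · subst hx; simp [pvStepA, pvG, ih]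
    · by_cases hy : x = ']'
      · subst hy
        cases flag with
        | false => simp [pvStepA, hx, pvG, ih]
        | true => simp [pvStepA, hx, pvG, ih]
      · cases flag with
        | false => simp [pvStepA, hx, hy, pvG, ih]
        | true => simp [pvStepA, hx, hy, pvG, ih]

theorem pvG_no_close : ∀ (s : List Char), ']' ∉ s → ∀ (flag : Bool) (word : List Char),
    pvG flag word s = [] := by
  intro s
  induction s with
  | nil => intro _ flag word; simp [pvG]
  | cons x t ih =>
    intro hmem flag word
    have hy : x ≠ ']' := fun h => hmem (h ▸ List.mem_cons_self ..)
    have ht : ']' ∉ t := fun h => hmem (List.mem_cons_of_mem _ h)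
    by_cases hx : x = '['
    · subst hx; simp [pvG, ih ht]
    · cases flag <;> simp [pvG, hx, hy, ih ht]

theorem pvG_open : ∀ (p : List Char), ']' ∉ p → ∀ (word : List Char) (t : List Char),
    pvG true word (p ++ ']' :: t) = (word ++ p.filter (· ≠ '[')) :: pvG false [] t := by
  intro p
  induction p with
  | nil => intro _ word t; simp [pvG]
  | cons x q ih =>
    intro hmem word t
    have hy : x ≠ ']' := fun h => hmem (h ▸ List.mem_cons_self ..)
    have hq : ']' ∉ q := fun h => hmem (List.mem_cons_of_mem _ h)
    by_cases hx : x = '['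
    · subst hx; simp [pvG, ih hq]
    · simp [pvG, hx, hy, ih hq]

theorem pvG_piece : ∀ (p : List Char), ']' ∉ p → ∀ (t : List Char),
    pvG false [] (p ++ ']' :: t) = pvEmit p ++ pvG false [] t := by
  intro p
  induction p with
  | nil => intro _ t; simp [pvG, pvEmit]
  | cons x q ih =>
    intro hmem t
    have hy : x ≠ ']' := fun h => hmem (h ▸ List.mem_cons_self ..)
    have hq : ']' ∉ q := fun h => hmem (List.mem_cons_of_mem _ h)
    by_cases hx : x = '['
    · subst hx
      rw [List.cons_append, show pvG false [] ('[' :: (q ++ ']' :: t)) = pvG true [] (q ++ ']' :: t) by simp [pvG]]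
      rw [pvG_open q hq]
      simp [pvEmit]
    · simp only [List.cons_append, pvG, hx, hy, if_false, if_neg, Bool.false_eq_true,
        not_false_iff]
      rw [ih hq]
      have hx' : ¬ ('[' = x) := fun h => hx h.symm
      have : pvEmit (x :: q) = pvEmit q := by
        simp [pvEmit, hx, hx', List.dropWhile_cons, List.mem_cons]
      rw [this]

theorem pvFirstOcc (c : Char) : ∀ (s : List Char), c ∈ s →
    ∃ a r, c ∉ a ∧ s = a ++ c :: r := by
  intro s
  induction s with
  | nil => intro h; simp at h
  | cons x t ih =>
    intro h
    by_cases hx : x = c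
    · exact ⟨[], t, by simp, by simp [hx]⟩
    · obtain ⟨a, r, ha, hs⟩ := ih (by rcases List.mem_cons.mp h with h | h; exact (hx h.symm).elim; exact h)
      exact ⟨x :: a, r, by simp [ha, Ne.symm hx], by simp [hs]⟩

theorem pvMain : ∀ (n : Nat) (s : List Char), s.length ≤ n →
    pvG false [] s = ((pvSplit ']' [] s).dropLast).flatMap pvEmit := by
  intro n
  induction n with
  | zero =>
    intro s h
    have : s = [] := List.eq_nil_of_length_eq_zero (Nat.le_zero.mp h)
    subst this; simp [pvG, pvSplit]
  | succ n ih =>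
    intro s h
    by_cases hmem : ']' ∈ s
    · obtain ⟨a, r, ha, hs⟩ := pvFirstOcc ']' s hmem
      subst hs
      rw [pvG_piece a ha, pvSplit_first ']' a ha, List.nil_append]
      have hr : r.length ≤ n := by simp [List.length_append] at h; omega
      rw [ih r hr]
      have hne : pvSplit ']' [] r ≠ [] := by
        intro hc
        have := pvSplit_length ']' r []
        rw [hc] at this; simp at this
      rw [List.dropLast_cons_of_ne_nil hne, List.flatMap_cons]
    · rw [pvG_no_close s hmem, pvSplit_of_not_mem ']' s hmem, List.nil_append]
      simp

theorem pvJoinNil : ∀ (l : List (List Char)), PySem.Chars.join [] l = l.flatten := by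
  intro l
  show ([] : List Char).intercalate l = l.flatten
  rw [List.intercalate]
  induction l with
  | nil => simp
  | cons a t ih =>
    cases t with
    | nil => simp
    | cons b u => simpa [List.intersperse] using ih

theorem pvDropFirst (c : Char) : ∀ (a : List Char), c ∉ a → ∀ (r : List Char),
    (a ++ c :: r).dropWhile (· ≠ c) = c :: r := by
  intro a
  induction a with
  | nil => intro _ r; simp [List.dropWhile_cons]
  | cons x t ih =>
    intro hmem r
    have hx : x ≠ c := fun h => hmem (h ▸ List.mem_cons_self ..)
    simp only [List.cons_append, List.dropWhile_cons]
    rw [if_pos (by simpa using hx)]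
    exact ih (fun h => hmem (List.mem_cons_of_mem _ h)) r

theorem pvPiece (p : List Char) :
    (if (pvSplit '[' [] p).length > 1 then
        [PySem.Chars.join [] ((pvSplit '[' [] p).drop 1)]
      else []) = pvEmit p := by
  by_cases hmem : '[' ∈ p
  · obtain ⟨a, r, ha, hp⟩ := pvFirstOcc '[' p hmem
    subst hp
    rw [pvSplit_first '[' a ha, List.nil_append]
    have hlen : (a :: pvSplit '[' [] r).length > 1 := by
      have := pvSplit_length '[' r []
      simp [this]
    rw [if_pos hlen]
    have hdrop : (a :: pvSplit '[' [] r).drop 1 = pvSplit '[' [] r := by simp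
    rw [hdrop]
    have hjoin : PySem.Chars.join [] (pvSplit '[' [] r) = r.filter (· ≠ '[') := by
      rw [pvJoinNil]
      simpa using pvSplit_flatten '[' r []
    rw [hjoin]
    unfold pvEmit
    rw [if_pos hmem, pvDropFirst '[' a ha r, List.tail_cons]
  · have hlen : ¬ (pvSplit '[' [] p).length > 1 := by
      rw [pvSplit_length '[' p []]
      have : p.count '[' = 0 := List.count_eq_zero.mpr hmem
      omega
    simp [hlen, pvEmit, hmem]

theorem pvAltChar (s : String) :
    create_basket_from_txt_alt s = ((pvSplit ']' [] s.toList).dropLast).flatMap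
      (fun p => (pvEmit p).map String.ofList) := by
  unfold create_basket_from_txt_alt
  rw [pvSplitOn_eq, PySem.List.slice_to_neg_one]
  have hstep : (fun (basket : List String) (piece : List Char) =>
      let parts := PySem.Chars.splitOn piece ['[']
      if parts.length > 1 then
        basket ++ [String.ofList (PySem.Chars.join [] (PySem.List.slice parts (some 1) none))]
      else basket)
      = fun basket piece => basket ++ (pvEmit piece).map String.ofList := by
    funext basket piece
    dsimp only
    rw [show PySem.Chars.splitOn piece ['['] = pvSplit '[' [] piece from pvSplitOn_eq '[' piece]
    rw [PySem.List.slice_from (pvSplit '[' [] piece) (a := 1) (by norm_num)]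
    rw [show ((1 : Int)).toNat = 1 from rfl, show List.drop 1 (pvSplit '[' [] piece) = (pvSplit '[' [] piece).drop 1 from rfl]
    rw [← pvPiece piece]
    split
    · simp
    · simp
  rw [hstep, PySem.List.foldl_append_eq_flatMap]
  simp [List.flatMap_def]

-- ===== VERDICT (by name: the statement is the Claim_ definition above) =====
theorem create_basket_from_txt_spec : Claim_equal_create_basket_from_txt := by
  intro s _
  unfold Spec_create_basket_from_txt create_basket_from_txt
  rw [pvFoldA s.toList false [] [], List.nil_append]
  rw [pvMain s.toList.length s.toList (le_refl _), pvAltChar s]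
  simp [List.map_flatMap]
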